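-- pv_equiv track=rewrite | github.com/Rejean-McCormick/abstract-wiki-architect | app/core/domain/morphology/austronesian.py | _redup_cv
-- ===== SOURCE A (Python) =====
-- def _redup_cv(stem: str) -> str:
--     """
--     Very simple CV-reduplication:
--     - take initial consonant cluster + following vowel (C?V),
--     - prepend that to the stem.
--
--     This is a coarse approximation and can be tuned by config later.
--     """
--     if not stem:
--         return stem
--
--     # Find the first vowel
--     vowels = "aeiouAEIOU"
--     idx = -1
--     for i, ch in enumerate(stem):
--         if ch in vowels:
--             idx = i
--             break
--
--     if idx == -1:
--         # No vowel → no reduplication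
--         return stem
--
--     # CV segment is stem[0:idx+1]
--     segment = stem[: idx + 1]
--     return segment + stem
-- ===== SOURCE B (Python) =====
-- def _redup_cv(stem: str) -> str:
--     """CV-reduplication by per-vowel search: find each vowel's first position
--     with str.find and take the minimum hit, instead of scanning positions."""
--     hits = [j for j in (stem.find(v) for v in "aeiouAEIOU") if j != -1]
--     if not hits:
--         return stem
--     return stem[: min(hits) + 1] + stem
-- ===== Notes on version B (the rewrite author's own statement) =====
-- stated objective: alternative
-- what changed: Instead of one indexed scan over positions testing vowel membership, B runs str.find once per vowel character and takes the minimum of the hit indices (empty hit list covers both the empty stem and the no-vowel case), then slices and prepends.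
import Mathlib
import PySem

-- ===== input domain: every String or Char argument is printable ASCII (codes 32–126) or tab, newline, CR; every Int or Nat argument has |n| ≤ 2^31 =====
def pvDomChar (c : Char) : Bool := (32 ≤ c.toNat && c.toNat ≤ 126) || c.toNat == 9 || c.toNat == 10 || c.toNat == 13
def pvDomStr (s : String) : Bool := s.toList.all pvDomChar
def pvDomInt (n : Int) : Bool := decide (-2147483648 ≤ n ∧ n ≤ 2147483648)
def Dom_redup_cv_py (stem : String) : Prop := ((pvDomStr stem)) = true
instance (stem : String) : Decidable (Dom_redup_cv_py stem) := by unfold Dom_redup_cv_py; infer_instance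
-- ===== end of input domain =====

-- B replaces A's single indexed position scan by ten per-vowel str.find searches
-- whose minimum hit is the first-vowel index (alternative decomposition; same cost).

-- ===== PORT A =====
-- 'ch in vowels' with vowels = "aeiouAEIOU"
def isVowelPy (c : Char) : Bool := ("aeiouAEIOU".toList).contains c

-- the 'for i, ch in enumerate(stem): if ch in vowels: idx = i; break' loop, literally
def findVowelIdxA : List Char → Int → Int
  | [], _ => -1
  | c :: rest, i => if isVowelPy c then i else findVowelIdxA rest (i + 1)

def redup_cv_py (stem : String) : String :=
  if stem.toList = [] then stem
  else
    let idx := findVowelIdxA stem.toList 0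
    if idx = -1 then stem
    else
      let segment := PySem.List.slice stem.toList none (some (idx + 1))
      String.ofList (segment ++ stem.toList)

-- ===== PORT B =====
-- [j for j in (stem.find(v) for v in "aeiouAEIOU") if j != -1]; min(hits); slice + prepend
def redup_cv_py_alt (stem : String) : String :=
  let hits := (("aeiouAEIOU".toList).map
      (fun v => PySem.Chars.find stem.toList [v])).filter (fun j => j ≠ -1)
  match PySem.List.min? hits (fun j => j) with
  | none => stem
  | some m => String.ofList (PySem.List.slice stem.toList none (some (m + 1)) ++ stem.toList)

-- ===== PRECONDITION & SPEC =====
def Spec_redup_cv_py (stem : String) (out : String) : Prop := out = redup_cv_py_alt stem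
instance (stem : String) (out : String) : Decidable (Spec_redup_cv_py stem out) := by unfold Spec_redup_cv_py; infer_instance

-- ===== CLAIM =====
def Claim_equal_redup_cv_py : Prop := ∀ (stem : String), Dom_redup_cv_py stem → Spec_redup_cv_py stem (redup_cv_py stem)

-- ===== LEMMAS AND PROOFS =====

-- single-character infix = membership
theorem singleton_infix_iff {a : Type} (v : a) (l : List a) : [v] <:+: l ↔ v ∈ l := by
  constructor
  · rintro ⟨s, t, hst⟩
    rw [← hst]; simp
  · intro h
    obtain ⟨s, t, hst⟩ := List.append_of_mem h
    exact ⟨s, t, by simp [hst]⟩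

-- the head after dropWhile fails the predicate
theorem dropWhile_head_false {a : Type} (p : a → Bool) :
    ∀ (l : List a) (v : a) (t : List a), l.dropWhile p = v :: t → p v = false := by
  intro l
  induction l with
  | nil => intro v t h; simp at h
  | cons c r ih =>
    intro v t h
    by_cases hc : p c
    · rw [List.dropWhile_cons_of_pos hc] at h; exact ih v t h
    · rw [List.dropWhile_cons_of_neg hc] at h
      obtain ⟨rfl, -⟩ := List.cons.inj h
      simpa using hc
-- any element at an index inside the takeWhile run satisfies the predicate
theorem takeWhile_drop_true {a : Type} (p : a → Bool) :
    ∀ (l : List a) (j : Nat) (v : a) (t : List a),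
      j < (l.takeWhile p).length → l.drop j = v :: t → p v = true := by
  intro l
  induction l with
  | nil => intro j v t hj _; simp at hj
  | cons c r ih =>
    intro j v t hj hd
    by_cases hc : p c
    · cases j with
      | zero =>
        simp at hd
        obtain ⟨rfl, -⟩ := hd
        exact hc
      | succ j =>
        rw [List.takeWhile_cons_of_pos hc, List.length_cons] at hj
        exact ih j v t (by omega) (by simpa using hd)
    · rw [List.takeWhile_cons_of_neg hc] at hj; simp at hj

-- A's scan: -1 iff the non-vowel run covers the string, else its length
theorem findVowelIdxA_eq (cs : List Char) : ∀ (i : Nat),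
    findVowelIdxA cs i =
      if (cs.takeWhile (fun c => !isVowelPy c)).length = cs.length
      then -1
      else ((i : Int) + ((cs.takeWhile (fun c => !isVowelPy c)).length : Int)) := by
  induction cs with
  | nil => intro i; simp [findVowelIdxA]
  | cons c rest ih =>
    intro i
    by_cases h : isVowelPy c
    · simp [findVowelIdxA, h]
    · have hrec := ih (i + 1)
      push_cast at hrec
      simp only [findVowelIdxA, h, List.takeWhile_cons, Bool.not_false,
        if_true, List.length_cons]
      rw [hrec]
      by_cases hl : (rest.takeWhile (fun c => !isVowelPy c)).length = rest.length
      · simp [hl]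
      · have hl' : ¬ ((rest.takeWhile (fun c => !isVowelPy c)).length + 1 = rest.length + 1) := by
          omega
        simp only [hl, if_false, hl', if_false]
        push_cast
        ring

-- ===== VERDICT =====
theorem redup_cv_py_spec : Claim_equal_redup_cv_py := by
  intro stem _
  unfold Spec_redup_cv_py redup_cv_py redup_cv_py_alt
  dsimp only
  set cs := stem.toList with hcs
  set tw := cs.takeWhile (fun c => !isVowelPy c) with htw
  set dw := cs.dropWhile (fun c => !isVowelPy c) with hdw
  have hsplit : tw ++ dw = cs := List.takeWhile_append_dropWhile
  have hlen : tw.length + dw.length = cs.length := by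
    rw [← List.length_append, hsplit]
  -- every index below tw.length holds a non-vowel
  have hbefore : ∀ (j : Nat) (v : Char) (t : List Char),
      j < tw.length → cs.drop j = v :: t → isVowelPy v = false := by
    intro j v t hj hd
    have := takeWhile_drop_true (fun c => !isVowelPy c) cs j v t (htw ▸ hj) hd
    simpa using this
  set hits := (("aeiouAEIOU".toList).map
      (fun v => PySem.Chars.find cs [v])).filter (fun j => j ≠ -1) with hhits
  have hfind := findVowelIdxA_eq cs 0
  rw [← htw] at hfind
  norm_num at hfind
  cases hd : dw with
  | nil =>
    -- no vowel in cs
    have hall : tw.length = cs.length := by rw [hd] at hlen; simpa using hlen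
    have htweq : tw = cs := by rw [← hsplit, hd, List.append_nil]
    have hnov : ∀ v, isVowelPy v = true → v ∉ cs := by
      intro v hv hmem
      have hmem' : v ∈ cs.takeWhile (fun c => !isVowelPy c) := by rw [← htw, htweq]; exact hmem
      have := List.mem_takeWhile_imp hmem'
      simp [hv] at this
    have hempty : hits = [] := by
      rw [hhits, List.filter_eq_nil_iff]
      intro j hj
      simp only [List.mem_map] at hj
      obtain ⟨v, hv, hvj⟩ := hj
      have hvow : isVowelPy v = true := by
        simp only [isVowelPy, List.contains_iff_mem]
        exact hv
      have : PySem.Chars.find cs [v] = -1 := by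
        rw [PySem.Chars.find_eq_neg_one_iff, singleton_infix_iff]
        exact hnov v hvow
      simp [← hvj, this]
    by_cases hne : cs = []
    · simp [hne, hempty, PySem.List.min?]
    · rw [if_neg hne, hfind, if_pos hall, if_pos rfl, hempty]
      simp [PySem.List.min?]
  | cons w rest =>
    have hall : tw.length ≠ cs.length := by rw [hd] at hlen; simp at hlen; omega
    have hne : cs ≠ [] := by
      intro h; rw [h] at hlen; rw [hd] at hlen; simp at hlen
    have hcs2 : cs = tw ++ (w :: rest) := by rw [← hsplit, hd]
    have hwvow : isVowelPy w = true := by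
      have := dropWhile_head_false (fun c => !isVowelPy c) cs w rest (by rw [← hdw, hd])
      simpa using this
    have hdropI : cs.drop tw.length = w :: rest := by
      rw [hcs2, List.drop_left]
    -- find cs [w] = tw.length
    have hfw : PySem.Chars.find cs [w] = (tw.length : Int) := by
      have hinf : [w] <:+: cs := (singleton_infix_iff w cs).2 (by rw [hcs2]; simp)
      have hnn : 0 ≤ PySem.Chars.find cs [w] := (PySem.Chars.find_nonneg_iff _ _).2 hinf
      obtain ⟨hpre, hmin⟩ := PySem.Chars.find_spec (s := cs) (sub := [w]) hnn
      have hle : (PySem.Chars.find cs [w]).toNat ≤ tw.length := by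
        by_contra hgt
        exact hmin tw.length (by omega) ⟨rest, by simp [hdropI]⟩
      have hge : tw.length ≤ (PySem.Chars.find cs [w]).toNat := by
        by_contra hlt
        obtain ⟨t, ht⟩ := hpre
        have := hbefore ((PySem.Chars.find cs [w]).toNat) w t (by omega) (by simpa using ht.symm)
        rw [hwvow] at this; exact absurd this (by simp)
      omega
    -- tw.length is a hit
    have hwmem : w ∈ "aeiouAEIOU".toList := by
      simpa [isVowelPy, List.contains_iff_mem] using hwvow
    have hImem : (tw.length : Int) ∈ hits := by
      rw [hhits, List.mem_filter]
      refine ⟨List.mem_map.2 ⟨w, hwmem, hfw⟩, by simp⟩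
    -- every hit is ≥ tw.length
    have hIle : ∀ j ∈ hits, (tw.length : Int) ≤ j := by
      intro j hj
      rw [hhits, List.mem_filter] at hj
      obtain ⟨hjm, hjne⟩ := hj
      obtain ⟨v, hv, hvj⟩ := List.mem_map.1 hjm
      have hjnn : 0 ≤ j := by
        have := PySem.Chars.neg_one_le_find (s := cs) (sub := [v])
        rw [hvj] at this
        simp at hjne
        omega
      obtain ⟨hpre, -⟩ := PySem.Chars.find_spec (s := cs) (sub := [v]) (by rw [hvj]; exact hjnn)
      rw [hvj] at hpre
      obtain ⟨t, ht⟩ := hpre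
      by_contra hlt
      have hvnon := hbefore j.toNat v t (by omega) (by simpa using ht.symm)
      have hvvow : isVowelPy v = true := by
        simp only [isVowelPy, List.contains_iff_mem]
        exact hv
      rw [hvvow] at hvnon; exact absurd hvnon (by simp)
    -- hence min? hits = tw.length
    have hmin : PySem.List.min? hits (fun j => j) = some ((tw.length : Int)) := by
      cases hm : PySem.List.min? hits (fun j => j) with
      | none =>
        have := (PySem.List.min?_eq_none_iff (xs := hits) (key := fun j => j)).1 hm
        rw [this] at hImem; simp at hImem
      | some m =>
        have hmmem := PySem.List.min?_mem hm
        have hmle := PySem.List.min?_isMin hm _ hImem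
        have hlem := hIle m hmmem
        have : m = (tw.length : Int) := le_antisymm hmle hlem
        rw [this]
    rw [if_neg hne, hfind, if_neg hall, if_neg (by omega), hmin]
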